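-- pv_equiv track=rewrite | github.com/Jmoz1/NeoAssistantPro | asset_selector.py | select_dividend_assets
-- ===== SOURCE A (Python) =====
-- def select_dividend_assets(assets, preferencias=None):
--     """
--     Selecciona activos enfocados en dividendos mensuales según preferencias.
--
--     Args:
--         assets (list): Lista de activos con datos de dividendos.
--         preferencias (dict, opcional): Preferencias para filtrar activos.
--
--     Returns:
--         list: Activos seleccionados (simulados).
--     """
--     activos_filtrados = assets
--     if preferencias:
--         for clave, valor in preferencias.items():
--             activos_filtrados = [
--                 a for a in activos_filtrados if a.get(clave) == valor
--             ]
--     # Simula selección de activos con dividendos mensuales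
--     return [a for a in activos_filtrados if a.get("dividendos_mensuales", False)]
-- ===== SOURCE B (Python) =====
-- def select_dividend_assets(assets, preferencias=None):
--     prefs = list((preferencias or {}).items())
--     return [
--         a for a in assets
--         if a.get("dividendos_mensuales", False)
--         and all(a.get(k) == v for k, v in prefs)
--     ]
-- ===== Notes on version B (the rewrite author's own statement) =====
-- stated objective: simpler
-- what changed: Replaces the loop that rebuilds the filtered list once per preference key (p+1 passes with intermediate lists) by one list comprehension over the original assets with a combined all(...)-predicate.
import Mathlib
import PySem

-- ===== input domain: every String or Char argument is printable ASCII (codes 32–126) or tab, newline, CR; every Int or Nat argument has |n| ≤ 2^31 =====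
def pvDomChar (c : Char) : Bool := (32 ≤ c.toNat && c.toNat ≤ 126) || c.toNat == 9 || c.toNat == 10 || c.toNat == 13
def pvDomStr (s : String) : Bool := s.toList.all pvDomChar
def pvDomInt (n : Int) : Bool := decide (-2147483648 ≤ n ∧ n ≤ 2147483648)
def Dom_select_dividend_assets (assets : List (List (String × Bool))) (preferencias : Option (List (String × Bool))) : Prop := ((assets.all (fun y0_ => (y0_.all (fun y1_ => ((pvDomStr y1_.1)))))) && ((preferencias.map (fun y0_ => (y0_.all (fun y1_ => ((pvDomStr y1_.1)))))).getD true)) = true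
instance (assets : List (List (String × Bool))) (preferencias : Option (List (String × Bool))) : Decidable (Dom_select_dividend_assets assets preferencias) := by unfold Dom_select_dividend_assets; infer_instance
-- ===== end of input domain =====

-- B replaces A's per-preference-key repeated filter passes by one single-pass filter with a combined all-predicate (objective: simpler).


-- ===== PORT A =====
-- a.get(clave) == valor : None-default get compared with a Bool, so equality holds iff the key is present with that value
def select_dividend_assets (assets : List (List (String × Bool))) (preferencias : Option (List (String × Bool))) : List (List (String × Bool)) :=
  let activos_filtrados :=
    match preferencias with
    | none => assets
    | some p =>
      if p = [] then assets            -- `if preferencias:` — empty dict is falsy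
      else (PySem.Dict.ofList p).items.foldl
        (fun acc (kv : String × Bool) => acc.filter (fun a => (PySem.Dict.ofList a).get? kv.1 == some kv.2)) assets
  activos_filtrados.filter (fun a => (PySem.Dict.ofList a).getD "dividendos_mensuales" false)

-- ===== PORT B =====
def select_dividend_assets_alt (assets : List (List (String × Bool))) (preferencias : Option (List (String × Bool))) : List (List (String × Bool)) :=
  let prefs := (PySem.Dict.ofList (preferencias.getD [])).items
  assets.filter (fun a =>
    (PySem.Dict.ofList a).getD "dividendos_mensuales" false
    && prefs.all (fun kv => (PySem.Dict.ofList a).get? kv.1 == some kv.2))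

-- ===== PRECONDITION & SPEC =====
def Spec_select_dividend_assets (assets : List (List (String × Bool))) (preferencias : Option (List (String × Bool))) (out : List (List (String × Bool))) : Prop := out = select_dividend_assets_alt assets preferencias
instance (assets : List (List (String × Bool))) (preferencias : Option (List (String × Bool))) (out : List (List (String × Bool))) : Decidable (Spec_select_dividend_assets assets preferencias out) := by unfold Spec_select_dividend_assets; infer_instance

-- ===== CLAIM (what is proved, stated in full; the proofs are below) =====
def Claim_equal_select_dividend_assets : Prop := ∀ (assets : List (List (String × Bool))) (preferencias : Option (List (String × Bool))), Dom_select_dividend_assets assets preferencias → Spec_select_dividend_assets assets preferencias (select_dividend_assets assets preferencias)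

-- ===== LEMMAS AND PROOFS =====

-- repeated filters, then a final filter, equal one filter with the conjoined predicate
theorem foldl_filter_eq_filter_all {α β : Type} (p : β → α → Bool) (q : α → Bool) :
    ∀ (items : List β) (xs : List α),
      (items.foldl (fun acc kv => acc.filter (p kv)) xs).filter q
        = xs.filter (fun a => q a && items.all (fun kv => p kv a)) := by
  intro items
  induction items with
  | nil => intro xs; simp
  | cons kv rest ih =>
    intro xs
    simp only [List.foldl_cons, ih, List.filter_filter, List.all_cons]
    apply List.filter_congr
    intro a _
    cases q a <;> cases p kv a <;> simp

theorem select_dividend_assets_eq_alt (assets : List (List (String × Bool))) (preferencias : Option (List (String × Bool))) :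
    select_dividend_assets assets preferencias = select_dividend_assets_alt assets preferencias := by
  unfold select_dividend_assets select_dividend_assets_alt
  have hempty : (PySem.Dict.ofList ([] : List (String × Bool))).items = [] := by decide
  cases preferencias with
  | none => simp [hempty]
  | some p =>
    by_cases hp : p = []
    · subst hp; simp [hempty]
    · simp only [hp, if_false, Option.getD_some]
      exact foldl_filter_eq_filter_all
        (fun (kv : String × Bool) (a : List (String × Bool)) => (PySem.Dict.ofList a).get? kv.1 == some kv.2)
        (fun a => (PySem.Dict.ofList a).getD "dividendos_mensuales" false)
        (PySem.Dict.ofList p).items assets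

-- ===== VERDICT (by name: the statement is the Claim_ definition above) =====
theorem select_dividend_assets_spec : Claim_equal_select_dividend_assets := by
  intro assets preferencias _
  unfold Spec_select_dividend_assets
  exact select_dividend_assets_eq_alt assets preferencias
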